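-- pv_equiv track=rewrite | github.com/dexmo007/mongodict | dict/Test.py | find_close_index
-- ===== SOURCE A (Python) =====
-- def find_close_index(s: str, open_c, close_c, open_index: int):
--     open_count = 1
--     i = open_index + 1
--     while open_count != 0:
--         c = s[i]
--         if c == open_c:
--             open_count += 1
--         elif c == close_c:
--             open_count -= 1
--         i += 1
--     return i - 1
-- ===== SOURCE B (Python) =====
-- def find_close_index(s: str, open_c, close_c, open_index: int):
--     # Recursive descent: skip each nested group with a recursive call
--     # instead of keeping an integer depth counter.
--     i = open_index + 1
--     while True:
--         c = s[i]
--         if c == close_c: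
--             return i
--         if c == open_c:
--             i = find_close_index(s, open_c, close_c, i)
--         i += 1
-- ===== Notes on version B (the rewrite author's own statement) =====
-- stated objective: alternative
-- what changed: B is a recursive-descent matcher: it scans from open_index+1, returns at the first close character, and skips each nested group by a recursive call whose result restarts the scan, replacing A's integer depth counter; Pre_ excludes exactly the inputs on which A raises IndexError (no balanced close character is ever reached).
import Mathlib
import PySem

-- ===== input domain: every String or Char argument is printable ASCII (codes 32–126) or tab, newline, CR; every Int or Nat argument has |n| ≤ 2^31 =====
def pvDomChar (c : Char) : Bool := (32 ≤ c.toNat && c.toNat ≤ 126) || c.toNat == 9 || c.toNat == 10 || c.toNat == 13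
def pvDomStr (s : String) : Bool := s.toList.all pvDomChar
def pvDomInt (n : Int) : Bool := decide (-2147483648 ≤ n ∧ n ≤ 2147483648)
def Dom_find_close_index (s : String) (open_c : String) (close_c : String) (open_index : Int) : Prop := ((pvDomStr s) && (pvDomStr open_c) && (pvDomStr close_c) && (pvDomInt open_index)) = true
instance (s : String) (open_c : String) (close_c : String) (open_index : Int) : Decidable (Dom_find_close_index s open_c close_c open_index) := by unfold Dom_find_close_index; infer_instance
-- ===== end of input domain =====

-- B replaces A's integer depth counter by a recursive-descent matcher: return at the first
-- close character, skip each nested group by a recursive call. Return value only (no mutation).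

-- ===== PORT A =====
-- needed by pvALoop's decreasing_by: a successful s[i] implies i < len(s)
theorem pvPyGetSome_lt {L : List Char} {i : Int} {c : Char}
    (h : PySem.List.pyGet? L i = some c) : i < (L.length : Int) := by
  by_contra hge
  push_neg at hge
  have hn : PySem.List.pyGet? L i = none := by
    rw [PySem.List.pyGet?_eq_none_iff]
    simp [PySem.Raise.InRange]
    omega
  simp [hn] at h

-- the 'while open_count != 0' loop of A, state = (open_count, i); chars are read with s[i]
def pvALoop (L : List Char) (oc cc : List Char) (cnt : Int) (i : Int) : Int :=
  if cnt = 0 then i - 1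
  else
    match h : PySem.List.pyGet? L i with
    | none => 0   -- IndexError: unreachable under Pre_
    | some c =>
      pvALoop L oc cc (if oc == [c] then cnt + 1 else if cc == [c] then cnt - 1 else cnt) (i + 1)
termination_by ((L.length : Int) + 1 - i).toNat
decreasing_by
  have := pvPyGetSome_lt h
  omega

def find_close_index (s : String) (open_c : String) (close_c : String) (open_index : Int) : Int :=
  pvALoop s.toList open_c.toList close_c.toList 1 (open_index + 1)

-- ===== PORT B =====
-- B's loop/recursion: at index i read s[i]; close -> return i; open -> recursive call from i+1,
-- then continue after the returned match; otherwise step to i+1. The fuel argument only makes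
-- the recursion structural (indices strictly increase, so 2*len(s)+1 steps are never exhausted
-- on the inputs Pre_ admits); none = IndexError.
def pvGo (L : List Char) (oc cc : List Char) : Nat → Int → Option Int
  | 0, _ => none
  | f + 1, i =>
    match PySem.List.pyGet? L i with
    | none => none   -- IndexError
    | some c =>
      if cc == [c] then some i
      else if oc == [c] then
        match pvGo L oc cc f (i + 1) with
        | none => none
        | some j => pvGo L oc cc f (j + 1)
      else pvGo L oc cc f (i + 1)

def find_close_index_alt (s : String) (open_c : String) (close_c : String) (open_index : Int) : Int :=
  match pvGo s.toList open_c.toList close_c.toList (2 * s.toList.length + 1) (open_index + 1) with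
  | some j => j
  | none => 0   -- IndexError: unreachable under Pre_

-- ===== PRECONDITION & SPEC =====
-- Pre_ excludes exactly the inputs on which A raises IndexError (it scans past the end of s
-- because no matching close character exists from open_index + 1 on): there must be a position j
-- of the scanned character sequence holding close_c (and not open_c) at which the numbers of
-- preceding open and close characters balance.
-- the sequence of characters A's loop reads: s[open_index+1:], wrapping through the whole
-- string once when open_index + 1 is a negative in-range index (Python indexing)
def pvPreSeq (s : String) (open_index : Int) : List Char :=
  if 0 ≤ open_index + 1 then s.toList.drop (open_index + 1).toNat
  else if -(s.toList.length : Int) ≤ open_index + 1 then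
    s.toList.drop ((s.toList.length : Int) + (open_index + 1)).toNat ++ s.toList
  else []

def Pre_find_close_index (s : String) (open_c : String) (close_c : String) (open_index : Int) : Prop :=
  ((List.range (pvPreSeq s open_index).length).any (fun j =>
     match (pvPreSeq s open_index)[j]? with
     | some c => close_c.toList == [c] && !(open_c.toList == [c]) &&
         (((pvPreSeq s open_index).take j).countP (fun d => open_c.toList == [d]) ==
          ((pvPreSeq s open_index).take j).countP (fun d => close_c.toList == [d] && !(open_c.toList == [d])))
     | none => false)) = true
instance (s : String) (open_c : String) (close_c : String) (open_index : Int) : Decidable (Pre_find_close_index s open_c close_c open_index) := by unfold Pre_find_close_index; infer_instance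

def pvWitness_find_close_index : String × String × String × Int := ("(a)", "(", ")", 0)

def Spec_find_close_index (s : String) (open_c : String) (close_c : String) (open_index : Int) (out : Int) : Prop := out = find_close_index_alt s open_c close_c open_index
instance (s : String) (open_c : String) (close_c : String) (open_index : Int) (out : Int) : Decidable (Spec_find_close_index s open_c close_c open_index out) := by unfold Spec_find_close_index; infer_instance

-- ===== CLAIM (what is proved, stated in full; the proofs are below) =====
def Claim_equal_find_close_index : Prop := ∀ (s : String) (open_c : String) (close_c : String) (open_index : Int), Dom_find_close_index s open_c close_c open_index → Pre_find_close_index s open_c close_c open_index → Spec_find_close_index s open_c close_c open_index (find_close_index s open_c close_c open_index)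

-- ===== LEMMAS AND PROOFS =====

-- reference scan: offset (relative to the current suffix) at which the depth first hits 0
def pvScan (isO isC : Char → Bool) : List Char → Int → Option Nat
  | [], _ => none
  | c :: r, d =>
    let d' := if isO c then d + 1 else if isC c then d - 1 else d
    if d' = 0 then some 0 else (pvScan isO isC r d').map (· + 1)

-- A's loop equals the reference scan along any sequence t that matches s[i0], s[i0+1], …
theorem pvALoop_eq_scan (L oc cc : List Char) (t : List Char) (i0 : Int)
    (hget : ∀ k : Nat, PySem.List.pyGet? L (i0 + k) = t[k]?) :
    ∀ (m k : Nat) (d : Int), t.length - k ≤ m → d ≠ 0 →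
      pvALoop L oc cc d (i0 + k) =
        (match pvScan (fun c => oc == [c]) (fun c => cc == [c]) (t.drop k) d with
         | some off => i0 + k + off
         | none => 0) := by
  intro m
  induction m with
  | zero =>
    intro k d hm hd
    have hk : t.length ≤ k := by omega
    have hnone : PySem.List.pyGet? L (i0 + k) = none := by
      rw [hget k]; exact List.getElem?_eq_none hk
    rw [pvALoop, if_neg hd]
    split
    next =>
      simp [List.drop_eq_nil_of_le hk, pvScan]
    next c hsome =>
      rw [hnone] at hsome
      simp at hsome
  | succ m ih =>
    intro k d hm hd
    rw [pvALoop, if_neg hd]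
    split
    next hnone =>
      have hgk : t[k]? = none := by rw [← hget k]; exact hnone
      have hk : t.length ≤ k := by
        rcases Nat.lt_or_ge k t.length with hlt | hge
        · rw [List.getElem?_eq_getElem hlt] at hgk; simp at hgk
        · exact hge
      simp [List.drop_eq_nil_of_le hk, pvScan]
    next c hsome =>
      have hgk : t[k]? = some c := by rw [← hget k]; exact hsome
      have hk : k < t.length := by
        rcases Nat.lt_or_ge k t.length with hlt | hge
        · exact hlt
        · rw [List.getElem?_eq_none hge] at hgk; simp at hgk
      have hdropk : t.drop k = c :: t.drop (k + 1) := by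
        have h1 : t[k] = c := by
          rw [List.getElem?_eq_getElem hk] at hgk; exact Option.some_inj.mp hgk
        rw [← List.getElem_cons_drop hk, h1]
      set d' : Int := if (oc == [c]) = true then d + 1 else if (cc == [c]) = true then d - 1 else d with hd'
      by_cases h0 : d' = 0
      · -- loop exits on the next check: returns (i0+k+1) - 1 = i0+k
        rw [pvALoop]
        simp only [← hd', h0, if_pos rfl]
        rw [hdropk]
        simp only [pvScan, ← hd', h0, if_pos rfl]
        push_cast
        ring
      · have hrec := ih (k + 1) d' (by omega) h0
        have hcast : i0 + (k : Int) + 1 = i0 + ((k + 1 : Nat) : Int) := by push_cast; ring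
        rw [hcast, hrec, hdropk]
        simp only [pvScan, ← hd', if_neg h0]
        cases pvScan (fun c => oc == [c]) (fun c => cc == [c]) (t.drop (k + 1)) d' with
        | none => rfl
        | some off => simp; push_cast; ring

-- s[i] for i = i0, i0+1, … reads the suffix from a nonnegative start index i0
theorem pvGet_nonneg (L : List Char) (i0 : Int) (h : 0 ≤ i0) :
    ∀ k : Nat, PySem.List.pyGet? L (i0 + k) = (L.drop i0.toNat)[k]? := by
  intro k
  rw [PySem.List.pyGet?_of_nonneg L (by omega), List.getElem?_drop]
  congr 1
  omega

-- s[i] from a negative in-range start index reads the tail, then the whole string once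
theorem pvGet_wrap (L : List Char) (i0 : Int) (hneg : i0 < 0) (hge : -(L.length : Int) ≤ i0) :
    ∀ k : Nat, PySem.List.pyGet? L (i0 + k) = (L.drop ((L.length : Int) + i0).toNat ++ L)[k]? := by
  intro k
  have hdl : (L.drop ((L.length : Int) + i0).toNat).length = (-i0).toNat := by
    simp [List.length_drop]
    omega
  by_cases hk : (k : Int) < -i0
  · have h1 : i0 + k < 0 := by omega
    have e1 : i0 + (k : Int) = -(((-(i0 + k)).toNat : Nat) : Int) := by omega
    rw [e1, PySem.List.pyGet?_neg_natCast L (-(i0 + k)).toNat (by omega) (by omega)]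
    rw [List.getElem?_append_left (by omega)]
    rw [List.getElem?_drop]
    congr 1
    omega
  · have h1 : 0 ≤ i0 + k := by omega
    rw [PySem.List.pyGet?_of_nonneg L h1]
    rw [List.getElem?_append_right (by omega)]
    congr 1
    omega

-- more fuel never changes a successful run of B's matcher
theorem pvGo_mono (L oc cc : List Char) :
    ∀ (f f' : Nat) (i j : Int), f ≤ f' → pvGo L oc cc f i = some j → pvGo L oc cc f' i = some j := by
  intro f
  induction f with
  | zero => intro f' i j _ h; simp [pvGo] at h
  | succ f ih =>
    intro f' i j hle h
    obtain ⟨f'', rfl⟩ : ∃ f'', f' = f'' + 1 := ⟨f' - 1, by omega⟩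
    rw [pvGo] at h ⊢
    cases hget : PySem.List.pyGet? L i with
    | none => rw [hget] at h; exact absurd h (by simp)
    | some c =>
      rw [hget] at h
      dsimp only at h ⊢
      by_cases hc : (cc == [c]) = true
      · simpa [hc] using h
      · rw [if_neg hc] at h ⊢
        by_cases ho : (oc == [c]) = true
        · rw [if_pos ho] at h ⊢
          cases h1 : pvGo L oc cc f (i + 1) with
          | none => rw [h1] at h; exact absurd h (by simp)
          | some j1 =>
            rw [h1] at h
            rw [ih f'' (i + 1) j1 (by omega) h1]
            exact ih f'' (j1 + 1) j (by omega) h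
        · rw [if_neg ho] at h ⊢
          exact ih f'' (i + 1) j (by omega) h

-- B's pending-continuations chain: run the matcher, then d-1 more times from after its result
def pvChain (L oc cc : List Char) (f : Nat) : Nat → Int → Option Int
  | 0, i => some (i - 1)
  | d + 1, i => (pvGo L oc cc f i).bind fun j => pvChain L oc cc f d (j + 1)

theorem pvChain_mono (L oc cc : List Char) :
    ∀ (d : Nat) (f f' : Nat) (i j : Int), f ≤ f' →
      pvChain L oc cc f d i = some j → pvChain L oc cc f' d i = some j := by
  intro d
  induction d with
  | zero => intro f f' i j _ h; simpa [pvChain] using h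
  | succ d ih =>
    intro f f' i j hle h
    rw [pvChain] at h ⊢
    rcases Option.bind_eq_some_iff.mp h with ⟨j1, h1, h2⟩
    rw [pvGo_mono L oc cc f f' i j1 hle h1]
    exact ih f f' (j1 + 1) j hle h2

-- B's chain follows the reference scan wherever the scan succeeds
theorem pvChain_of_scan (L oc cc t : List Char) (i0 : Int)
    (hget : ∀ k : Nat, PySem.List.pyGet? L (i0 + k) = t[k]?)
    (hdisj : ∀ c, (cc == [c]) = true → (oc == [c]) = false) :
    ∀ (n k d off f : Nat), t.length - k ≤ n → 1 ≤ d → t.length - k < f →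
      pvScan (fun c => oc == [c]) (fun c => cc == [c]) (t.drop k) (d : Int) = some off →
      pvChain L oc cc f d (i0 + k) = some (i0 + k + off) := by
  intro n
  induction n with
  | zero =>
    intro k d off f hm hd hf hscan
    have hk : t.length ≤ k := by omega
    rw [List.drop_eq_nil_of_le hk] at hscan
    simp [pvScan] at hscan
  | succ n ih =>
    intro k d off f hm hd hf hscan
    rcases Nat.lt_or_ge k t.length with hk | hk
    swap
    · rw [List.drop_eq_nil_of_le hk] at hscan
      simp [pvScan] at hscan
    obtain ⟨f', rfl⟩ : ∃ f', f = f' + 1 := ⟨f - 1, by omega⟩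
    obtain ⟨e, rfl⟩ : ∃ e, d = e + 1 := ⟨d - 1, by omega⟩
    have hgk : t[k]? = some (t[k]'hk) := List.getElem?_eq_getElem hk
    set c := t[k]'hk with hc
    have hdropk : t.drop k = c :: t.drop (k + 1) := by
      rw [← List.getElem_cons_drop hk]
    have hgetk : PySem.List.pyGet? L (i0 + k) = some c := by rw [hget k, hgk]
    have hkc : i0 + (k : Int) + 1 = i0 + ((k + 1 : Nat) : Int) := by push_cast; ring
    rw [hdropk] at hscan
    by_cases hO : (oc == [c]) = true
    · -- open character: one recursive call skips the group, then the chain continues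
      have hC : (cc == [c]) = false := by
        by_contra hcc
        have := hdisj c (by simpa using hcc)
        rw [hO] at this; exact absurd this (by simp)
      simp only [pvScan, hO, eq_self_iff_true, if_true] at hscan
      split at hscan
      · exfalso
        rename_i hcond
        push_cast at hcond
        omega
      rcases Option.map_eq_some_iff.mp hscan with ⟨o2, hs2, hoff⟩
      have hih := ih (k + 1) (e + 2) o2 f' (by omega) (by omega) (by omega)
        (by rw [show ((e + 2 : Nat) : Int) = ((e + 1 : Nat) : Int) + 1 by push_cast; ring]
            exact hs2)
      rw [pvChain] at hih
      rcases Option.bind_eq_some_iff.mp hih with ⟨j1, hj1, hrest⟩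
      rw [pvChain] at hrest
      rcases Option.bind_eq_some_iff.mp hrest with ⟨j2, hj2, hrest2⟩
      have hgo : pvGo L oc cc (f' + 1) (i0 + k) = some j2 := by
        rw [pvGo, hgetk]
        dsimp only
        rw [if_neg (by simp [hC]), if_pos hO, hkc, hj1]
        dsimp only
        exact hj2
      rw [pvChain, hgo]
      simp only [Option.bind_some]
      rw [pvChain_mono L oc cc e f' (f' + 1) (j2 + 1) _ (by omega) hrest2]
      congr 1
      omega
    · have hO' : (oc == [c]) = false := by simpa using hO
      by_cases hC : (cc == [c]) = true
      · -- close character: B returns here; the chain pops one pending continuation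
        have hgo : pvGo L oc cc (f' + 1) (i0 + k) = some (i0 + k) := by
          rw [pvGo, hgetk]
          dsimp only
          rw [if_pos hC]
        simp only [pvScan, hO', Bool.false_eq_true, if_false, hC, eq_self_iff_true,
          if_true] at hscan
        split at hscan
        · rename_i hcond
          have he : e = 0 := by push_cast at hcond; omega
          subst he
          have hoff : off = 0 := by
            have := Option.some_inj.mp hscan
            omega
          subst hoff
          rw [pvChain, hgo]
          simp only [Option.bind_some, pvChain]
          congr 1
          omega
        · rename_i hcond
          obtain ⟨e', rfl⟩ : ∃ e', e = e' + 1 := by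
            have he : e ≠ 0 := by
              intro h
              subst h
              apply hcond
              norm_num
            exact ⟨e - 1, by omega⟩
          rcases Option.map_eq_some_iff.mp hscan with ⟨o2, hs2, hoff⟩
          have hih := ih (k + 1) (e' + 1) o2 (f' + 1) (by omega) (by omega) (by omega)
            (by rw [show ((e' + 1 : Nat) : Int) = ((e' + 1 + 1 : Nat) : Int) - 1 by push_cast; ring]
                exact hs2)
          rw [pvChain, hgo]
          simp only [Option.bind_some]
          rw [hkc, hih]
          congr 1
          omega
      · -- other character: both sides just step forward
        have hC' : (cc == [c]) = false := by simpa using hC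
        simp only [pvScan, hO', hC', Bool.false_eq_true, if_false] at hscan
        split at hscan
        · exfalso
          rename_i hcond
          push_cast at hcond
          omega
        rcases Option.map_eq_some_iff.mp hscan with ⟨o2, hs2, hoff⟩
        have hih := ih (k + 1) (e + 1) o2 f' (by omega) (by omega) (by omega) hs2
        rw [pvChain] at hih
        rcases Option.bind_eq_some_iff.mp hih with ⟨j1, hj1, hrest⟩
        have hgo : pvGo L oc cc (f' + 1) (i0 + k) = some j1 := by
          rw [pvGo, hgetk]
          dsimp only
          rw [if_neg (by simp [hC']), if_neg (by simp [hO']), hkc]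
          exact hj1
        rw [pvChain, hgo]
        simp only [Option.bind_some]
        rw [pvChain_mono L oc cc e f' (f' + 1) (j1 + 1) _ (by omega) hrest]
        congr 1
        omega

-- a balanced close position anywhere in the sequence makes the reference scan succeed
theorem pvScan_some_of_balanced (isO isC : Char → Bool) :
    ∀ (l : List Char) (d : Int), 1 ≤ d →
      (∃ j, ∃ hj : j < l.length, isC l[j] = true ∧ isO l[j] = false ∧
         d + ((l.take j).countP isO : Int)
           - ((l.take j).countP (fun x => isC x && !isO x) : Int) = 1) →
      ∃ off, pvScan isO isC l d = some off := by
  intro l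
  induction l with
  | nil =>
    intro d _ hex
    obtain ⟨j, hj, _⟩ := hex
    simp at hj
  | cons c r ih =>
    intro d hd hex
    obtain ⟨j, hj, hcj, hoj, hbal⟩ := hex
    set d' : Int := if isO c then d + 1 else if isC c then d - 1 else d with hd'
    by_cases h0 : d' = 0
    · exact ⟨0, by simp [pvScan, ← hd', h0]⟩
    · have hd1 : 1 ≤ d' := by
        rw [hd'] at h0 ⊢
        split_ifs at h0 ⊢ <;> omega
      cases j with
      | zero =>
        simp at hcj hoj
        simp [List.take_zero] at hbal
        have : d' = 0 := by rw [hd', if_neg (by simp [hoj]), if_pos hcj]; omega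
        exact absurd this h0
      | succ j' =>
        have hj' : j' < r.length := by simpa using hj
        have hcj' : isC r[j'] = true := by simpa using hcj
        have hoj' : isO r[j'] = false := by simpa using hoj
        have htake : (c :: r).take (j' + 1) = c :: r.take j' := by simp
        rw [htake] at hbal
        have hbal' : d' + ((r.take j').countP isO : Int)
            - ((r.take j').countP (fun x => isC x && !isO x) : Int) = 1 := by
          by_cases hOc : isO c
          · rw [hd', if_pos hOc]
            simp [List.countP_cons, hOc] at hbal
            push_cast at hbal ⊢
            omega
          · by_cases hCc : isC c
            · rw [hd', if_neg hOc, if_pos hCc]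
              simp [List.countP_cons, hOc, hCc] at hbal
              push_cast at hbal ⊢
              omega
            · rw [hd', if_neg hOc, if_neg hCc]
              simp [List.countP_cons, hOc, hCc] at hbal
              push_cast at hbal ⊢
              omega
        rcases ih d' hd1 ⟨j', hj', hcj', hoj', hbal'⟩ with ⟨off', hoff'⟩
        refine ⟨off' + 1, ?_⟩
        simp [pvScan, ← hd', h0, hoff']

-- the scanned sequence is at most twice the string
theorem pvPreSeq_len (s : String) (oi : Int) :
    (pvPreSeq s oi).length ≤ 2 * s.toList.length := by
  unfold pvPreSeq
  by_cases h1 : (0 : Int) ≤ oi + 1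
  · simp only [if_pos h1, List.length_drop]
    omega
  · by_cases h2 : -(s.toList.length : Int) ≤ oi + 1
    · simp only [if_neg h1, if_pos h2, List.length_append, List.length_drop]
      omega
    · simp only [if_neg h1, if_neg h2, List.length_nil]
      omega

-- A's loop equals B's matcher along any sequence t carrying a balanced close position
theorem pvVerdictMain (oc cc : String) (L t : List Char) (i0 : Int)
    (hget : ∀ k : Nat, PySem.List.pyGet? L (i0 + k) = t[k]?)
    (j : Nat) (hjl : j < t.length)
    (hcc : cc.toList = [t[j]]) (hoc : (oc.toList == [t[j]]) = false)
    (hcnt : (t.take j).countP (fun d => oc.toList == [d]) =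
            (t.take j).countP (fun d => cc.toList == [d] && !(oc.toList == [d])))
    (hlen : t.length ≤ 2 * L.length) :
    pvALoop L oc.toList cc.toList 1 i0 =
      (match pvGo L oc.toList cc.toList (2 * L.length + 1) i0 with
       | some j => j
       | none => 0) := by
  have hdisj : ∀ c, (cc.toList == [c]) = true → (oc.toList == [c]) = false := by
    intro c h
    have h4 : t[j] = c := by
      have h3 : [t[j]] = [c] := hcc.symm.trans (by simpa using h)
      injection h3
    rw [← h4]
    exact hoc
  have hscan : ∃ off, pvScan (fun c => oc.toList == [c]) (fun c => cc.toList == [c]) t 1 = some off := by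
    apply pvScan_some_of_balanced
    · omega
    · refine ⟨j, hjl, by simp [hcc], by simp [hoc], ?_⟩
      have h5 := hcnt
      push_cast [h5]
      ring
  rcases hscan with ⟨off, hoff⟩
  have hA := pvALoop_eq_scan L oc.toList cc.toList t i0 hget t.length 0 1 (by omega) (by omega)
  rw [show i0 + ((0 : Nat) : Int) = i0 from by simp] at hA
  rw [List.drop_zero] at hA
  rw [hA, hoff]
  have hchain := pvChain_of_scan L oc.toList cc.toList t i0 hget hdisj
    t.length 0 1 off (2 * L.length + 1) (by omega) (by omega) (by omega)
    (by rw [List.drop_zero]; exact_mod_cast hoff)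
  rw [pvChain] at hchain
  rcases Option.bind_eq_some_iff.mp hchain with ⟨j1, hj1, hrest⟩
  simp only [pvChain] at hrest
  have hj1v : j1 = i0 + off := by
    injection hrest with h
    omega
  rw [show i0 + ((0 : Nat) : Int) = i0 from by simp] at hj1
  rw [hj1, hj1v]

-- ===== VERDICT (by name: the statement is the Claim_ definition above) =====
theorem find_close_index_spec : Claim_equal_find_close_index := by
  intro s oc cc oi _ hpre
  unfold Spec_find_close_index find_close_index find_close_index_alt
  unfold Pre_find_close_index at hpre
  rcases List.any_eq_true.mp hpre with ⟨j, hjr, hj⟩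
  have hjl : j < (pvPreSeq s oi).length := List.mem_range.mp hjr
  rw [List.getElem?_eq_getElem hjl] at hj
  simp only [Bool.and_eq_true, beq_iff_eq, Bool.not_eq_true'] at hj
  obtain ⟨⟨hcc, hoc⟩, hcnt⟩ := hj
  have hlen := pvPreSeq_len s oi
  by_cases h1 : 0 ≤ oi + 1
  · refine pvVerdictMain oc cc s.toList (pvPreSeq s oi) (oi + 1) ?_ j hjl hcc hoc hcnt hlen
    have := pvGet_nonneg s.toList (oi + 1) h1
    unfold pvPreSeq
    simp only [if_pos h1]
    exact this
  · by_cases h2 : -(s.toList.length : Int) ≤ oi + 1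
    · refine pvVerdictMain oc cc s.toList (pvPreSeq s oi) (oi + 1) ?_ j hjl hcc hoc hcnt hlen
      have := pvGet_wrap s.toList (oi + 1) (by omega) h2
      unfold pvPreSeq
      simp only [if_neg h1, if_pos h2]
      exact this
    · exfalso
      have hT : pvPreSeq s oi = [] := by
        unfold pvPreSeq
        simp only [if_neg h1, if_neg h2]
      rw [hT] at hjl
      simp at hjl
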